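-- pv_equiv track=rewrite | github.com/lmileski/natural_selection_game_program | model_helpers.py | produce_diagonal_matrix
-- ===== SOURCE A (Python) =====
-- def produce_diagonal_matrix(rectangular_matrix: list[list[int]]) -> list[list[int]]:
--     """
--     Goes through a rectangular matrix (each inner list contains an int for a square in a column)
--     Diagonal matrix will be needed for the ui's wipe transition from top left square to bottom right square
--     Each inner list contains a diagonal section of the board - in a 3x3 matrix the change looks like this:
--     [0] [1] [2]      [0] [1] [2]
--     [0] [1] [2]  ->  [1] [2] [3]
--     [0] [1] [2]      [2] [3] [4]
--     where each integer corresponds to the index of that item's inner list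
--
--     Preconditions:
--         - length and width are equal
--         - 2 <= side length <= 8
--
--     Doctests:
--     >>> produce_diagonal_matrix([[0, 1, 2], [1, 2, 3], [2, 3, 4]])
--     [[0], [1, 1], [2, 2, 2], [3, 3], [4]]
--     >>> produce_diagonal_matrix([[0, 1, 2, 3, 4], [1, 2, 3, 4, 5], [2, 3, 4, 5 ,6], [3, 4, 5, 6, 7], [4, 5, 6, 7, 8]])
--     [[0], [1, 1], [2, 2, 2], [3, 3, 3, 3], [4, 4, 4, 4, 4], [5, 5, 5, 5], [6, 6, 6], [7, 7], [8]]
--     """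
--     # checking precondition that rectangular matrix is actually rectangular
--     num_columns = len(rectangular_matrix)
--     # side lengths must be between 2-8, inclusive
--     assert 2 <= num_columns <= 8
--     for column in rectangular_matrix:
--         assert num_columns == len(column)
--
--     board_length = len(rectangular_matrix) # height and width must be equal
--     num_inner_lists = board_length*2-1
--     diagonal_matrix: list[list[int]] = [[] for i in range(num_inner_lists)]
--     row = 0
--     for x, column in enumerate(rectangular_matrix):
--         inner_list_i = x # indexed list always starts as the column number
--         while row < board_length:
--             diagonal_matrix[inner_list_i].append(column[row])
--             row += 1
--             inner_list_i += 1
--         row = 0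
--
--     return diagonal_matrix
-- ===== SOURCE B (Python) =====
-- def produce_diagonal_matrix(rectangular_matrix: list[list[int]]) -> list[list[int]]:
--     # gather over output diagonals instead of scattering source columns
--     n = len(rectangular_matrix)
--     assert 2 <= n <= 8
--     for column in rectangular_matrix:
--         assert n == len(column)
--     return [[col[d - x] for x, col in enumerate(rectangular_matrix) if 0 <= d - x < n]
--             for d in range(2 * n - 1)]
-- ===== Notes on version B (the rewrite author's own statement) =====
-- stated objective: alternative
-- what changed: B builds each output diagonal directly as a gather (for each diagonal d collect matrix[x][d-x]) instead of A's scatter that appends every column entry into a pre-allocated list of empty diagonals.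
import Mathlib
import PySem

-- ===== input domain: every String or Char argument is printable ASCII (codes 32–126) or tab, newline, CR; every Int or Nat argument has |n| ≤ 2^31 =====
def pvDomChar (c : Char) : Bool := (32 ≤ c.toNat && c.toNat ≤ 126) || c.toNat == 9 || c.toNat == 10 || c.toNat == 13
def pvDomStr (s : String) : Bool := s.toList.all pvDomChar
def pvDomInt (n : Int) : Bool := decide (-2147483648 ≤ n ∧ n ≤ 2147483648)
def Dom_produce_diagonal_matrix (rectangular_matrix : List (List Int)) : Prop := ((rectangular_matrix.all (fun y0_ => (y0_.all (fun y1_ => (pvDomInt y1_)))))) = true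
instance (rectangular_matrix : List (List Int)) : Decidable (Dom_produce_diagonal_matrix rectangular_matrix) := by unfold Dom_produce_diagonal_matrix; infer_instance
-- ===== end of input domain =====

-- B builds each diagonal directly by gathering matrix[x][d-x]; A scatters column entries into pre-allocated empty diagonals.

-- ===== PORT A =====
-- diagonal_matrix[i].append(v)  (List.set out of range is the identity, matching i < len, which always holds here)
def pvAppendAt (dm : List (List Int)) (i : Nat) (v : Int) : List (List Int) :=
  dm.set i (dm.getD i [] ++ [v])

-- the 'while row < board_length' inner loop of A for one column
def pvScatterCol (n x : Nat) (col : List Int) (dm : List (List Int)) : List (List Int) :=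
  (List.range n).foldl (fun dm row => pvAppendAt dm (x + row) (col.getD row 0)) dm

-- 'for x, column in enumerate(rectangular_matrix)'
def pvScatter (n x : Nat) (cols : List (List Int)) (dm : List (List Int)) : List (List Int) :=
  match cols with
  | [] => dm
  | col :: rest => pvScatter n (x + 1) rest (pvScatterCol n x col dm)

def produce_diagonal_matrix (rectangular_matrix : List (List Int)) : List (List Int) :=
  let board_length := rectangular_matrix.length
  let num_inner_lists := board_length * 2 - 1
  pvScatter board_length 0 rectangular_matrix (List.replicate num_inner_lists [])

-- ===== PORT B =====
-- inner comprehension: [col[d-x] for x, col in enumerate(m) if 0 <= d - x < n]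
-- (Nat condition x ≤ d ∧ d - x < n is exactly Python's 0 <= d-x < n)
def pvGatherDiag (n x : Nat) (cols : List (List Int)) (d : Nat) : List Int :=
  match cols with
  | [] => []
  | col :: rest =>
      (if x ≤ d ∧ d - x < n then [col.getD (d - x) 0] else []) ++ pvGatherDiag n (x + 1) rest d

def produce_diagonal_matrix_alt (rectangular_matrix : List (List Int)) : List (List Int) :=
  let n := rectangular_matrix.length
  (List.range (2 * n - 1)).map (fun d => pvGatherDiag n 0 rectangular_matrix d)

-- ===== PRECONDITION & SPEC =====
-- Pre_: exactly A's asserts (2 <= side <= 8, every row has the side's length); outside them Python A raises AssertionError.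
def Pre_produce_diagonal_matrix (rectangular_matrix : List (List Int)) : Prop :=
  2 ≤ rectangular_matrix.length ∧ rectangular_matrix.length ≤ 8 ∧
  ∀ c ∈ rectangular_matrix, c.length = rectangular_matrix.length
instance (rectangular_matrix : List (List Int)) : Decidable (Pre_produce_diagonal_matrix rectangular_matrix) := by unfold Pre_produce_diagonal_matrix; infer_instance
def pvWitness_produce_diagonal_matrix : List (List Int) := [[0, 1], [1, 2]]
def Spec_produce_diagonal_matrix (rectangular_matrix : List (List Int)) (out : List (List Int)) : Prop := out = produce_diagonal_matrix_alt rectangular_matrix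
instance (rectangular_matrix : List (List Int)) (out : List (List Int)) : Decidable (Spec_produce_diagonal_matrix rectangular_matrix out) := by unfold Spec_produce_diagonal_matrix; infer_instance

-- ===== CLAIM (what is proved, stated in full; the proofs are below) =====
def Claim_equal_produce_diagonal_matrix : Prop := ∀ (rectangular_matrix : List (List Int)), Dom_produce_diagonal_matrix rectangular_matrix → Pre_produce_diagonal_matrix rectangular_matrix → Spec_produce_diagonal_matrix rectangular_matrix (produce_diagonal_matrix rectangular_matrix)

-- ===== LEMMAS AND PROOFS =====

theorem pvAppendAt_length (dm : List (List Int)) (i : Nat) (v : Int) :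
    (pvAppendAt dm i v).length = dm.length := by
  simp [pvAppendAt]

theorem pvAppendAt_getD (dm : List (List Int)) (i : Nat) (v : Int) (d : Nat) :
    (pvAppendAt dm i v).getD d [] =
      if d = i ∧ i < dm.length then dm.getD d [] ++ [v] else dm.getD d [] := by
  simp only [pvAppendAt, List.getD, List.getElem?_set]
  split_ifs <;> simp_all

theorem pvScatterCol_length (n x : Nat) (col : List Int) (dm : List (List Int)) :
    (pvScatterCol n x col dm).length = dm.length := by
  induction n with
  | zero => simp [pvScatterCol]
  | succ k ih =>
      simp only [pvScatterCol, List.range_succ, List.foldl_append, List.foldl_cons, List.foldl_nil]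
      rw [pvAppendAt_length]
      exact ih

theorem pvScatterCol_getD (n x : Nat) (col : List Int) (dm : List (List Int))
    (hb : x + n ≤ dm.length) (d : Nat) :
    (pvScatterCol n x col dm).getD d [] =
      dm.getD d [] ++ (if x ≤ d ∧ d - x < n then [col.getD (d - x) 0] else []) := by
  induction n with
  | zero =>
      simp only [pvScatterCol, List.range_zero, List.foldl_nil]
      simp
  | succ k ih =>
      have hb' : x + k ≤ dm.length := by omega
      simp only [pvScatterCol, List.range_succ, List.foldl_append, List.foldl_cons, List.foldl_nil]
      rw [show (List.foldl (fun dm row => pvAppendAt dm (x + row) (col.getD row 0)) dm (List.range k)) = pvScatterCol k x col dm from rfl]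
      rw [pvAppendAt_getD]
      rw [pvScatterCol_length]
      rw [ih hb']
      by_cases hd : d = x + k
      · have h3 : d = x + k ∧ x + k < dm.length := ⟨hd, by omega⟩
        simp [h3]
      · have h3 : ¬ (d = x + k ∧ x + k < dm.length) := by tauto
        have h5 : (x ≤ d ∧ d - x < k + 1) ↔ (x ≤ d ∧ d - x < k) := by omega
        simp only [h3, if_false, h5]

theorem pvScatter_length (cols : List (List Int)) (n x : Nat) (dm : List (List Int)) :
    (pvScatter n x cols dm).length = dm.length := by
  induction cols generalizing x dm with
  | nil => simp [pvScatter]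
  | cons col rest ih =>
      simp only [pvScatter]
      rw [ih, pvScatterCol_length]

theorem pvScatter_getD (cols : List (List Int)) (n x : Nat) (dm : List (List Int))
    (hb : x + cols.length + n ≤ dm.length + 1) (d : Nat) :
    (pvScatter n x cols dm).getD d [] = dm.getD d [] ++ pvGatherDiag n x cols d := by
  induction cols generalizing x dm with
  | nil => simp [pvScatter, pvGatherDiag]
  | cons col rest ih =>
      simp only [pvScatter, pvGatherDiag]
      rw [ih _ _ (by rw [pvScatterCol_length]; simp at hb ⊢; omega)]
      rw [pvScatterCol_getD n x col dm (by simp at hb; omega)]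
      rw [List.append_assoc]

theorem final_eq (m : List (List Int)) :
    produce_diagonal_matrix m = produce_diagonal_matrix_alt m := by
  have hlenA : (produce_diagonal_matrix m).length = m.length * 2 - 1 := by
    simp [produce_diagonal_matrix, pvScatter_length]
  have hlenB : (produce_diagonal_matrix_alt m).length = 2 * m.length - 1 := by
    simp [produce_diagonal_matrix_alt]
  apply List.ext_getElem (by omega)
  intro d hdA hdB
  have hd : d < 2 * m.length - 1 := by omega
  have hd' : d < m.length * 2 - 1 := by omega
  have hA : (produce_diagonal_matrix m).getD d [] = pvGatherDiag m.length 0 m d := by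
    simp only [produce_diagonal_matrix]
    rw [pvScatter_getD m m.length 0 _ (by simp; omega) d]
    simp [List.getD, hd']
  have hB : (produce_diagonal_matrix_alt m).getD d [] = pvGatherDiag m.length 0 m d := by
    simp [produce_diagonal_matrix_alt, List.getD, hd]
  have h : (produce_diagonal_matrix m).getD d [] = (produce_diagonal_matrix_alt m).getD d [] := by
    rw [hA, hB]
  simpa [List.getD, List.getElem?_eq_getElem, hdA, hdB] using h

-- ===== VERDICT (by name: the statement is the Claim_ definition above) =====
theorem produce_diagonal_matrix_spec : Claim_equal_produce_diagonal_matrix := by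
  intro m _ _
  exact final_eq m
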